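-- pv_equiv track=rewrite | github.com/svbailey/Retikon | retikon_core/query_engine/query_runner.py | rank_of_expected
-- ===== SOURCE A (Python) =====
-- from typing import Iterable, Sequence
--
-- def rank_of_expected(results: Sequence[str], expected: Sequence[str]) -> int | None:
--     expected_set = {uri for uri in expected if uri}
--     if not expected_set:
--         return None
--     for idx, uri in enumerate(results, start=1):
--         if uri in expected_set:
--             return idx
--     return None
-- ===== SOURCE B (Python) =====
-- def rank_of_expected(results, expected):
--     positions = {}
--     for idx, uri in enumerate(results, start=1):
--         if uri not in positions:
--             positions[uri] = idx
--     ranks = [positions[uri] for uri in expected if uri and uri in positions]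
--     return min(ranks) if ranks else None
-- ===== Notes on version B (the rewrite author's own statement) =====
-- stated objective: alternative
-- what changed: B replaces A's set-build plus early-exit scan of results with a one-pass first-occurrence position index over results followed by a min over the ranks of the truthy expected uris.
import Mathlib
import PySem

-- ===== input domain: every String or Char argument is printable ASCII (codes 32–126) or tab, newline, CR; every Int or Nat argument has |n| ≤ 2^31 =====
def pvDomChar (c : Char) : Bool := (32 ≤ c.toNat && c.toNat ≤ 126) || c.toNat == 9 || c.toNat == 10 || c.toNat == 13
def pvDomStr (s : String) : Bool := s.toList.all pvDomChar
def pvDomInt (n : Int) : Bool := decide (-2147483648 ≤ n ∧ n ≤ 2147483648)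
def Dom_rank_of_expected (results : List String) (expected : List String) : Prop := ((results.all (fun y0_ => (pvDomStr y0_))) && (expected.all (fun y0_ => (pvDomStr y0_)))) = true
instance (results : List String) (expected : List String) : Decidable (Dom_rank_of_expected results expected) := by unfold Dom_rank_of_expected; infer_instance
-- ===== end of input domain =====

-- B builds a first-occurrence rank index over results and takes the min rank over the truthy
-- expected uris, instead of A's early-exit scan of results against a set of expected uris.

-- ===== PORT A =====
-- for idx, uri in enumerate(results, start=1): if uri in expected_set: return idx
def rankScanA (s : PySem.Set String) : List String → Int → Option Int
  | [], _ => none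
  | r :: rs, i => if PySem.Set.contains s r then some i else rankScanA s rs (i + 1)

def rank_of_expected (results : List String) (expected : List String) : Option Int :=
  let expected_set := PySem.Set.ofList (expected.filter (fun u => u ≠ ""))
  if expected_set = [] then none
  else rankScanA expected_set results 1

-- ===== PORT B =====
-- for idx, uri in enumerate(results, start=1): if uri not in positions: positions[uri] = idx
def posIndexB : List String → Int → PySem.Dict String Int → PySem.Dict String Int
  | [], _, d => d
  | r :: rs, i, d => posIndexB rs (i + 1) (if d.contains r then d else d.insert r i)

def rank_of_expected_alt (results : List String) (expected : List String) : Option Int :=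
  let positions := posIndexB results 1 PySem.Dict.empty
  let ranks := expected.filterMap (fun u => if u ≠ "" then positions.get? u else none)
  if ranks = [] then none else PySem.List.min? ranks (fun x => x)

-- ===== PRECONDITION & SPEC =====
def Spec_rank_of_expected (results : List String) (expected : List String) (out : Option Int) : Prop := out = rank_of_expected_alt results expected
instance (results : List String) (expected : List String) (out : Option Int) : Decidable (Spec_rank_of_expected results expected out) := by unfold Spec_rank_of_expected; infer_instance

-- ===== CLAIM (what is proved, stated in full; the proofs are below) =====
def Claim_equal_rank_of_expected : Prop := ∀ (results : List String) (expected : List String), Dom_rank_of_expected results expected → Spec_rank_of_expected results expected (rank_of_expected results expected)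

-- ===== LEMMAS AND PROOFS =====

-- first 1-based-from-i position of u in the list (the value B's positions index stores)
def firstPos : List String → Int → String → Option Int
  | [], _, _ => none
  | r :: rs, i, u => if r = u then some i else firstPos rs (i + 1) u

theorem firstPos_ge : ∀ (rs : List String) (i v : Int) (u : String),
    firstPos rs i u = some v → i ≤ v := by
  intro rs
  induction rs with
  | nil => intro i v u h; simp [firstPos] at h
  | cons r rs ih =>
    intro i v u h
    simp only [firstPos] at h
    by_cases hr : r = u
    · simp [hr] at h; omega
    · simp [hr] at h; have := ih (i + 1) v u h; omega

theorem posIndexB_get : ∀ (rs : List String) (i : Int) (d : PySem.Dict String Int) (u : String),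
    (posIndexB rs i d).get? u = (d.get? u).or (firstPos rs i u) := by
  intro rs
  induction rs with
  | nil => intro i d u; simp [posIndexB, firstPos]
  | cons r rs ih =>
    intro i d u
    simp only [posIndexB, firstPos]
    rw [ih, PySem.Dict.contains_eq_isSome_get?]
    rcases h : d.get? r with _ | v
    · simp only [Option.isSome_none, Bool.false_eq_true, if_false]
      by_cases hr : r = u
      · subst hr; simp [h, PySem.Dict.get?_insert_self]
      · rw [PySem.Dict.get?_insert_of_ne _ _ (fun h' => hr h'.symm)]; simp [hr]
    · simp only [Option.isSome_some, if_true]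
      by_cases hr : r = u
      · subst hr; simp [h]
      · simp [hr]

theorem scan_eq_min (expected : List String) : ∀ (rs : List String) (i : Int),
    rankScanA (PySem.Set.ofList (expected.filter (fun u => u ≠ ""))) rs i =
      (if expected.filterMap (fun u => if u ≠ "" then firstPos rs i u else none) = [] then none
       else PySem.List.min? (expected.filterMap (fun u => if u ≠ "" then firstPos rs i u else none)) (fun x => x)) := by
  intro rs
  induction rs with
  | nil =>
    intro i
    simp [rankScanA, firstPos]
  | cons r rs ih =>
    intro i
    simp only [rankScanA]
    by_cases hc : PySem.Set.contains (PySem.Set.ofList (expected.filter (fun u => u ≠ ""))) r = true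
    · rw [if_pos hc]
      have hrmem : r ∈ expected ∧ r ≠ "" := by
        rw [PySem.Set.contains_iff, PySem.Set.mem_ofList, List.mem_filter] at hc
        exact ⟨hc.1, by simpa using hc.2⟩
      have hmem : (i : Int) ∈ expected.filterMap (fun u => if u ≠ "" then firstPos (r :: rs) i u else none) := by
        rw [List.mem_filterMap]
        exact ⟨r, hrmem.1, by simp [hrmem.2, firstPos]⟩
      rw [if_neg (fun h => by rw [h] at hmem; simp at hmem)]
      rcases hmin : PySem.List.min? (expected.filterMap (fun u => if u ≠ "" then firstPos (r :: rs) i u else none)) (fun x => x) with _ | m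
      · rw [PySem.List.min?_eq_none_iff] at hmin
        rw [hmin] at hmem; simp at hmem
      · have h2 := PySem.List.min?_isMin hmin i hmem
        have h1 := PySem.List.min?_mem hmin
        rw [List.mem_filterMap] at h1
        rcases h1 with ⟨u, _, hum⟩
        have hgem : i ≤ m := by
          by_cases h'' : u = ""
          · simp [h''] at hum
          · simp [h''] at hum; exact firstPos_ge _ _ _ _ hum
        have : m = i := le_antisymm h2 hgem
        rw [this]
    · rw [if_neg hc]
      have hranks : expected.filterMap (fun u => if u ≠ "" then firstPos (r :: rs) i u else none)
          = expected.filterMap (fun u => if u ≠ "" then firstPos rs (i + 1) u else none) := by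
        apply List.filterMap_congr
        intro u hu
        by_cases h'' : u = ""
        · simp [h'']
        · have hur : r ≠ u := by
            intro h; subst h
            exact hc (by
              rw [PySem.Set.contains_iff, PySem.Set.mem_ofList]
              exact List.mem_filter.mpr ⟨hu, by simp [h'']⟩)
          simp [h'', firstPos, hur]
      simp only [hranks]
      exact ih (i + 1)

-- ===== VERDICT (by name: the statement is the Claim_ definition above) =====
theorem rank_of_expected_spec : Claim_equal_rank_of_expected := by
  unfold Claim_equal_rank_of_expected
  intro results expected _
  unfold Spec_rank_of_expected rank_of_expected rank_of_expected_alt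
  have hpos : ∀ u, (posIndexB results 1 PySem.Dict.empty).get? u = firstPos results 1 u := by
    intro u; rw [posIndexB_get]; simp [PySem.Dict.get?_empty]
  have hranks : expected.filterMap (fun u => if u ≠ "" then (posIndexB results 1 PySem.Dict.empty).get? u else none)
      = expected.filterMap (fun u => if u ≠ "" then firstPos results 1 u else none) := by
    apply List.filterMap_congr
    intro u _; rw [hpos]
  simp only [hranks]
  by_cases hS : PySem.Set.ofList (expected.filter (fun u => u ≠ "")) = []
  · rw [if_pos hS]
    have hnil : expected.filterMap (fun u => if u ≠ "" then firstPos results 1 u else none) = [] := by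
      rw [List.filterMap_eq_nil_iff]
      intro u hu
      by_cases h'' : u = ""
      · simp [h'']
      · exfalso
        have : u ∈ PySem.Set.ofList (expected.filter (fun u => u ≠ "")) := by
          rw [PySem.Set.mem_ofList]
          exact List.mem_filter.mpr ⟨hu, by simp [h'']⟩
        rw [hS] at this; simp at this
    rw [hnil]
    simp
  · rw [if_neg hS, scan_eq_min]
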